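-- pv_equiv track=rewrite | github.com/TFHVoe/RunningDinner | main.py | elkeganganderadres
-- ===== SOURCE A (Python) =====
-- def elkeganganderadres(ts):#Functie die telt hoe vaak er niet door een persoon een voor, hoofd en nagerecht gegeten wordt en dat dit op een ander adres is.
--     """Functie die telt hoe vaak niet door ieder persoon 3 gangen op verschillende adressen gegeten wordt."""
--     lst_unique = []
--     for i, j in ts.items():
--         for k in i[0:2:len(i)]: #For loop die een lijst vult met alle unique deelnemers.
--             if k not in lst_unique:
--                 lst_unique.append(k)
--
--     lst_amount = []
--     gangen = ['Voor','Hoofd','Na']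
--     for i in lst_unique:
--         countabc = 0
--         lst_adres = []
--         for j, k in ts.items(): #Een complex van for loops die controlleert dat iedere deelnemer een voor, hoofd en na gerecht eet en dat geen gang op hetzelfde adres gegeten wordt.
--             for l in gangen:
--                 if i == j[0] and j[1] == l and k not in lst_adres:
--                     countabc += 1
--                     lst_adres.append(k)
--         lst_amount.append(countabc)
--
--     fout_count = 0
--     for i in lst_amount:
--         if i != 3:      #Een for loop die telt hoe vaak er niet voldaan wordt aan de eisen dat er een voor, hoofd en nagerecht gegeten wordt en dat dit op een ander adres is.
--             fout_count += 1
--     return fout_count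
-- ===== SOURCE B (Python) =====
-- def elkeganganderadres(ts):
--     """Count persons who do not eat exactly the 3 courses at 3 distinct addresses.
--
--     One pass: group each person to the set of addresses of their valid courses."""
--     gangen = ('Voor', 'Hoofd', 'Na')
--     adressen = {}
--     for (naam, gang), adres in ts.items():
--         s = adressen.setdefault(naam, set())
--         if gang in gangen:
--             s.add(adres)
--     return sum(1 for s in adressen.values() if len(s) != 3)
-- ===== Notes on version B (the rewrite author's own statement) =====
-- stated objective: faster
-- what changed: Replaces A's per-person rescan of the whole dict (and the inner loop over the three course names) by a single grouping pass that maps each person to the set of addresses of their valid courses, then counts persons whose set size is not 3.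
import Mathlib
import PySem

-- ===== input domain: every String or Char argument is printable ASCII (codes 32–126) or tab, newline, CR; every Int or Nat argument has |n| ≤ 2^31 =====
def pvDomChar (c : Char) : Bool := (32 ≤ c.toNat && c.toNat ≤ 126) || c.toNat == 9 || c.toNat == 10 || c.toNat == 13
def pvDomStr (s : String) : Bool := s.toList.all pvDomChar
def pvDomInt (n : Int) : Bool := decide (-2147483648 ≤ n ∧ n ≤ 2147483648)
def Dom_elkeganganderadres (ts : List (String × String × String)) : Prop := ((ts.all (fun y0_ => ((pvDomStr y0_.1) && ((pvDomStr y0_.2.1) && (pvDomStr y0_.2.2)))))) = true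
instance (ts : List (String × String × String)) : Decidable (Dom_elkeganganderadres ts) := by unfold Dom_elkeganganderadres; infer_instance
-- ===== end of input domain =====

-- B replaces A's per-person rescans of the dict by one grouping pass (person ↦ set of addresses); equivalence of the return value is proved.

-- Argument marshalling shared by both ports: the Python parameter is the dict
-- {(naam, gang): adres}; a triple list with duplicate (naam, gang) keys collapses
-- to the dict's insertion-ordered, key-unique item list.
def pvItems (ts : List (String × String × String)) : List ((String × String) × String) :=
  (ts.foldl (fun d t => d.insert (t.1, t.2.1) t.2.2)
    (PySem.Dict.empty : PySem.Dict (String × String) String)).items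

-- ===== PORT A =====
def elkeganganderadres (ts : List (String × String × String)) : Int :=
  let items := pvItems ts
  -- i[0:2:len(i)] on the 2-tuple key i is the 1-tuple (i[0],) (slice start 0, stop 2, step 2)
  let lst_unique := items.foldl (fun lst ij =>
      ([ij.1.1] : List String).foldl (fun lst k => if k ∉ lst then lst ++ [k] else lst) lst) []
  let gangen : List String := ["Voor", "Hoofd", "Na"]
  let lst_amount := lst_unique.foldl (fun lst_amount i =>
      let st := items.foldl (fun (st : Int × List String) jk =>
          gangen.foldl (fun (st : Int × List String) l =>
            if i = jk.1.1 ∧ jk.1.2 = l ∧ jk.2 ∉ st.2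
            then (st.1 + 1, st.2 ++ [jk.2]) else st) st) ((0 : Int), ([] : List String))
      lst_amount ++ [st.1]) []
  lst_amount.foldl (fun fout_count i => if i ≠ 3 then fout_count + 1 else fout_count) 0

-- ===== PORT B =====
def elkeganganderadres_alt (ts : List (String × String × String)) : Int :=
  let gangen : List String := ["Voor", "Hoofd", "Na"]
  let adressen := (pvItems ts).foldl
      (fun (ad : PySem.Dict String (PySem.Set String)) p =>
        -- s = adressen.setdefault(naam, set()); if gang in gangen: s.add(adres)
        let ad := ad.setdefault p.1.1 PySem.Set.empty
        if p.1.2 ∈ gangen then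
          ad.insert p.1.1 (PySem.Set.add (ad.getD p.1.1 PySem.Set.empty) p.2)
        else ad)
      PySem.Dict.empty
  adressen.values.foldl (fun acc s => if PySem.Set.len s ≠ 3 then acc + 1 else acc) 0

-- ===== PRECONDITION & SPEC =====
def Spec_elkeganganderadres (ts : List (String × String × String)) (out : Int) : Prop := out = elkeganganderadres_alt ts
instance (ts : List (String × String × String)) (out : Int) : Decidable (Spec_elkeganganderadres ts out) := by unfold Spec_elkeganganderadres; infer_instance

-- ===== CLAIM (what is proved, stated in full; the proofs are below) =====
def Claim_equal_elkeganganderadres : Prop := ∀ (ts : List (String × String × String)), Dom_elkeganganderadres ts → Spec_elkeganganderadres ts (elkeganganderadres ts)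

-- ===== LEMMAS AND PROOFS =====

def pvGangen : List String := ["Voor", "Hoofd", "Na"]

/-- first-occurrence list of names, as both programs build it -/
def pvUniq (L : List ((String × String) × String)) (acc : List String) : List String :=
  L.foldl (fun lst ij => if ij.1.1 ∉ lst then lst ++ [ij.1.1] else lst) acc

/-- set of addresses of person `p`'s valid-course items, over `L`, from `s` -/
def pvAddrs (p : String) (L : List ((String × String) × String)) (s : PySem.Set String) :
    PySem.Set String :=
  L.foldl (fun s q => if p = q.1.1 ∧ q.1.2 ∈ pvGangen then PySem.Set.add s q.2 else s) s

lemma pv_inner_fold (i : String) (jk : (String × String) × String) (st : Int × List String) :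
    pvGangen.foldl (fun st l =>
        if i = jk.1.1 ∧ jk.1.2 = l ∧ jk.2 ∉ st.2
        then (st.1 + 1, st.2 ++ [jk.2]) else st) st
      = if i = jk.1.1 ∧ jk.1.2 ∈ pvGangen ∧ jk.2 ∉ st.2
        then (st.1 + 1, st.2 ++ [jk.2]) else st := by
  obtain ⟨c, s⟩ := st
  simp only [pvGangen, List.foldl, List.mem_cons, List.not_mem_nil, or_false]
  by_cases h1 : i = jk.1.1 <;> by_cases h2 : jk.2 ∈ s <;>
    by_cases hv : jk.1.2 = "Voor" <;> by_cases hh : jk.1.2 = "Hoofd" <;>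
    by_cases hn : jk.1.2 = "Na" <;> simp_all

lemma pvAddrs_cons (i : String) (q : (String × String) × String)
    (L : List ((String × String) × String)) (s : PySem.Set String) :
    pvAddrs i (q :: L) s
      = pvAddrs i L (if i = q.1.1 ∧ q.1.2 ∈ pvGangen then PySem.Set.add s q.2 else s) := rfl

lemma pv_count_fold (i : String) (L : List ((String × String) × String)) :
    ∀ (c : Int) (s : List String),
      L.foldl (fun (st : Int × List String) jk =>
          pvGangen.foldl (fun (st : Int × List String) l =>
            if i = jk.1.1 ∧ jk.1.2 = l ∧ jk.2 ∉ st.2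
            then (st.1 + 1, st.2 ++ [jk.2]) else st) st) (c, s)
        = (c + ((pvAddrs i L s).length : Int) - (s.length : Int), pvAddrs i L s) := by
  induction L with
  | nil => intro c s; simp [pvAddrs]
  | cons q L ih =>
      intro c s
      rw [List.foldl_cons, pv_inner_fold, pvAddrs_cons]
      by_cases hc : i = q.1.1 ∧ q.1.2 ∈ pvGangen
      · by_cases h2 : q.2 ∈ s
        · have hno : ¬ (i = q.1.1 ∧ q.1.2 ∈ pvGangen ∧ q.2 ∉ s) := fun h => h.2.2 h2
          have hadd : PySem.Set.add s q.2 = s := by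
            simp [PySem.Set.add, PySem.Set.contains, h2]
          rw [if_neg hno, if_pos hc, hadd]
          exact ih c s
        · have hyes : i = q.1.1 ∧ q.1.2 ∈ pvGangen ∧ q.2 ∉ s := ⟨hc.1, hc.2, h2⟩
          have hadd : PySem.Set.add s q.2 = s ++ [q.2] := by
            simp [PySem.Set.add, PySem.Set.contains, h2]
          rw [if_pos hyes, if_pos hc, hadd, ih (c + 1) (s ++ [q.2])]
          rw [Prod.mk.injEq]
          refine ⟨?_, rfl⟩
          simp only [List.length_append, List.length_cons, List.length_nil]
          push_cast
          ring
      · have hno : ¬ (i = q.1.1 ∧ q.1.2 ∈ pvGangen ∧ q.2 ∉ s) := fun h => hc ⟨h.1, h.2.1⟩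
        rw [if_neg hno, if_neg hc]
        exact ih c s

/-- B's grouping loop -/
def pvFoldB (L : List ((String × String) × String)) (ad : PySem.Dict String (PySem.Set String)) :
    PySem.Dict String (PySem.Set String) :=
  L.foldl (fun ad p =>
      let ad := ad.setdefault p.1.1 PySem.Set.empty
      if p.1.2 ∈ pvGangen then
        ad.insert p.1.1 (PySem.Set.add (ad.getD p.1.1 PySem.Set.empty) p.2)
      else ad) ad

lemma pvFoldB_keys (L : List ((String × String) × String)) :
    ∀ ad, (pvFoldB L ad).keys = pvUniq L ad.keys := by
  induction L with
  | nil => intro ad; rfl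
  | cons q L ih =>
      intro ad
      rw [show pvFoldB (q :: L) ad = pvFoldB L
            (if q.1.2 ∈ pvGangen then
               (ad.setdefault q.1.1 PySem.Set.empty).insert q.1.1
                 (PySem.Set.add ((ad.setdefault q.1.1 PySem.Set.empty).getD q.1.1
                   PySem.Set.empty) q.2)
             else ad.setdefault q.1.1 PySem.Set.empty) from rfl]
      rw [ih, show pvUniq (q :: L) ad.keys
            = pvUniq L (if q.1.1 ∉ ad.keys then ad.keys ++ [q.1.1] else ad.keys) from rfl]
      congr 1
      by_cases hm : ad.contains q.1.1 = true
      · have hmem : q.1.1 ∈ ad.keys := (PySem.Dict.contains_iff_mem_keys ad q.1.1).mp hm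
        rw [PySem.Dict.setdefault_of_contains ad PySem.Set.empty hm]
        by_cases hg : q.1.2 ∈ pvGangen
        · rw [if_pos hg, PySem.Dict.keys_insert_of_contains ad _ hm]
          simp [hmem]
        · rw [if_neg hg]
          simp [hmem]
      · have hm' : ad.contains q.1.1 = false := by simpa using hm
        have hmem : q.1.1 ∉ ad.keys := fun h =>
          hm ((PySem.Dict.contains_iff_mem_keys ad q.1.1).mpr h)
        rw [PySem.Dict.setdefault_of_not_contains ad PySem.Set.empty hm']
        by_cases hg : q.1.2 ∈ pvGangen
        · rw [if_pos hg,
            PySem.Dict.keys_insert_of_contains _ _ (PySem.Dict.contains_insert_self ad q.1.1 _),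
            PySem.Dict.keys_insert_of_not_contains ad _ hm']
          simp [hmem]
        · rw [if_neg hg, PySem.Dict.keys_insert_of_not_contains ad _ hm']
          simp [hmem]

lemma pvFoldB_getD (L : List ((String × String) × String)) (p : String) :
    ∀ ad, (pvFoldB L ad).getD p PySem.Set.empty
      = pvAddrs p L (ad.getD p PySem.Set.empty) := by
  induction L with
  | nil => intro ad; rfl
  | cons q L ih =>
      intro ad
      rw [show pvFoldB (q :: L) ad = pvFoldB L
            (if q.1.2 ∈ pvGangen then
               (ad.setdefault q.1.1 PySem.Set.empty).insert q.1.1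
                 (PySem.Set.add ((ad.setdefault q.1.1 PySem.Set.empty).getD q.1.1
                   PySem.Set.empty) q.2)
             else ad.setdefault q.1.1 PySem.Set.empty) from rfl]
      rw [ih, show pvAddrs p (q :: L) (ad.getD p PySem.Set.empty)
            = pvAddrs p L (if p = q.1.1 ∧ q.1.2 ∈ pvGangen then
                PySem.Set.add (ad.getD p PySem.Set.empty) q.2
              else ad.getD p PySem.Set.empty) from rfl]
      congr 1
      have hsd : (ad.setdefault q.1.1 PySem.Set.empty).getD p PySem.Set.empty
          = ad.getD p PySem.Set.empty := by
        by_cases hpq : p = q.1.1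
        · subst hpq; exact PySem.Dict.getD_setdefault_self ad q.1.1 _ _
        · rw [PySem.Dict.getD_eq_get?_getD, PySem.Dict.get?_setdefault_of_ne ad _ hpq,
            ← PySem.Dict.getD_eq_get?_getD]
      by_cases hg : q.1.2 ∈ pvGangen
      · rw [if_pos hg, PySem.Dict.getD_insert]
        by_cases hpq : p = q.1.1
        · rw [if_pos hpq, if_pos ⟨hpq, hg⟩]
          subst hpq
          rw [PySem.Dict.getD_setdefault_self]
        · rw [if_neg hpq, if_neg (fun h => hpq h.1), hsd]
      · rw [if_neg hg, if_neg (fun h => hg h.2), hsd]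

lemma pvUniq_nodup (L : List ((String × String) × String)) :
    ∀ acc, acc.Nodup → (pvUniq L acc).Nodup := by
  induction L with
  | nil => intro acc h; exact h
  | cons q L ih =>
      intro acc h
      rw [show pvUniq (q :: L) acc
            = pvUniq L (if q.1.1 ∉ acc then acc ++ [q.1.1] else acc) from rfl]
      by_cases hm : q.1.1 ∈ acc
      · rw [if_neg (by simp [hm])]; exact ih acc h
      · rw [if_pos (by simp [hm])]
        exact ih _ (by simp [List.nodup_append, h]; exact fun a ha e => hm (e ▸ ha))

lemma pv_foldl_append_map {α β : Type} (L : List α) (f : α → β) (acc : List β) :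
    L.foldl (fun acc x => acc ++ [f x]) acc = acc ++ L.map f := by
  induction L generalizing acc with
  | nil => simp
  | cons x L ih => simp [ih]

-- ===== VERDICT (by name: the statement is the Claim_ definition above) =====
theorem elkeganganderadres_spec : Claim_equal_elkeganganderadres := by
  intro ts _
  unfold Spec_elkeganganderadres
  have hA : elkeganganderadres ts
      = ((pvUniq (pvItems ts) []).map
            (fun i => ((pvAddrs i (pvItems ts) PySem.Set.empty).length : Int))).foldl
          (fun fc i => if i ≠ 3 then fc + 1 else fc) 0 := by
    have h0 : elkeganganderadres ts
        = ((pvUniq (pvItems ts) []).foldl (fun am i =>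
              am ++ [((pvItems ts).foldl (fun (st : Int × List String) jk =>
                  pvGangen.foldl (fun (st : Int × List String) l =>
                    if i = jk.1.1 ∧ jk.1.2 = l ∧ jk.2 ∉ st.2
                    then (st.1 + 1, st.2 ++ [jk.2]) else st) st)
                ((0 : Int), ([] : List String))).1]) []).foldl
            (fun fc i => if i ≠ 3 then fc + 1 else fc) 0 := rfl
    rw [h0, pv_foldl_append_map, List.nil_append]
    congr 1
    apply List.map_congr_left
    intro i _
    have h := congrArg Prod.fst (pv_count_fold i (pvItems ts) 0 [])
    exact h.trans (by simp)
  have hB : elkeganganderadres_alt ts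
      = (pvFoldB (pvItems ts) PySem.Dict.empty).values.foldl
          (fun acc s => if PySem.Set.len s ≠ 3 then acc + 1 else acc) 0 := rfl
  have hkeys : (pvFoldB (pvItems ts) PySem.Dict.empty).keys = pvUniq (pvItems ts) [] := by
    rw [pvFoldB_keys]
    rfl
  have hnd : (pvFoldB (pvItems ts) PySem.Dict.empty).keys.Nodup := by
    rw [hkeys]; exact pvUniq_nodup _ [] List.nodup_nil
  have hv := PySem.Dict.values_eq_map_keys _ hnd PySem.Set.empty
  have hmap : ((pvFoldB (pvItems ts) PySem.Dict.empty).keys).map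
        (fun k => (pvFoldB (pvItems ts) PySem.Dict.empty).getD k PySem.Set.empty)
      = (pvUniq (pvItems ts) []).map
        (fun k => pvAddrs k (pvItems ts) PySem.Set.empty) := by
    rw [hkeys]
    apply List.map_congr_left
    intro k _
    rw [pvFoldB_getD]
    rfl
  rw [hA, hB, hv, hmap, List.foldl_map, List.foldl_map]
  rfl
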